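-- pv_equiv track=rewrite | github.com/mutwo-org/mutwo.core | mutwo/parameters/pitches.py | _discard_nulls
-- ===== SOURCE A (Python) =====
-- import typing
--
-- def _discard_nulls(iterable: typing.Iterable[int]) -> typing.Tuple[int, ...]:
--     r"""Discard all zeros after the last not 0 - element of an arbitary iterable.
--
--     Return a tuple.
--     Arguments:
--         * iterable: the iterable, whose 0 - elements shall
--           be discarded
--
--     >>> tuple0 = (1, 0, 2, 3, 0, 0, 0)
--     >>> ls = [1, 3, 5, 0, 0, 0, 2, 0]
--     >>> JustIntonationPitch._discard_nulls(tuple0)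
--     (1, 0, 2, 3)
--     >>> JustIntonationPitch._discard_nulls(ls)
--     (1, 3, 5, 0, 0, 0, 2)
--     """
--
--     iterable = tuple(iterable)
--     c = 0
--     for i in reversed(iterable):
--         if i != 0:
--             break
--         c += 1
--     if c != 0:
--         return iterable[:-c]
--     return iterable
-- ===== SOURCE B (Python) =====
-- import typing
--
-- def _discard_nulls(iterable: typing.Iterable[int]) -> typing.Tuple[int, ...]:
--     """Forward single pass: track the index just past the last nonzero element."""
--     t = tuple(iterable)
--     last = 0
--     for idx, x in enumerate(t):
--         if x != 0:
--             last = idx + 1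
--     return t[:last]
-- ===== Notes on version B (the rewrite author's own statement) =====
-- stated objective: simpler
-- what changed: Replaces the reverse early-stopping scan that counts trailing zeros (plus the c != 0 negative-slice special case) with a single forward pass tracking the index past the last nonzero element, returning t[:last] unconditionally.
import Mathlib
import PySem

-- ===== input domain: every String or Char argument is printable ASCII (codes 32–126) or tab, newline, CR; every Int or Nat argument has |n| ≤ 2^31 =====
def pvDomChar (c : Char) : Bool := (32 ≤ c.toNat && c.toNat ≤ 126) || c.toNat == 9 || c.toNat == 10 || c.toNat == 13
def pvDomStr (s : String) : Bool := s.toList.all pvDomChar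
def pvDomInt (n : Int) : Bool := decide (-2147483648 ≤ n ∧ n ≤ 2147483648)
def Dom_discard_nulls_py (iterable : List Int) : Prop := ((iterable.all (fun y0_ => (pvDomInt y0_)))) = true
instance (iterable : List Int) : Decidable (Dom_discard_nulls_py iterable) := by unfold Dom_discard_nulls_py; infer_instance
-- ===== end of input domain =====

-- B replaces A's reverse trailing-zero count and negative-slice special case by a
-- single forward pass tracking the index past the last nonzero element (objective: simpler).

-- ===== PORT A =====
-- 'for i in reversed(iterable): if i != 0: break; c += 1'  (count of leading zeros of the reversed list)
def aCount : List Int → Nat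
  | [] => 0
  | i :: rest => if i ≠ 0 then 0 else aCount rest + 1

def discard_nulls_py (iterable : List Int) : List Int :=
  let c := aCount iterable.reverse
  if c ≠ 0 then PySem.List.slice iterable none (some (-(c : Int)))  -- iterable[:-c]
  else iterable

-- ===== PORT B =====
-- 'last = 0; for idx, x in enumerate(t): if x != 0: last = idx + 1; return t[:last]'
def discard_nulls_py_alt (iterable : List Int) : List Int :=
  let last : Int :=
    (PySem.List.enumerate iterable).foldl
      (fun acc p => if p.2 ≠ 0 then p.1 + 1 else acc) 0
  PySem.List.slice iterable none (some last)

-- ===== PRECONDITION & SPEC =====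
def Spec_discard_nulls_py (iterable : List Int) (out : List Int) : Prop := out = discard_nulls_py_alt iterable
instance (iterable : List Int) (out : List Int) : Decidable (Spec_discard_nulls_py iterable out) := by unfold Spec_discard_nulls_py; infer_instance

-- ===== CLAIM (what is proved, stated in full; the proofs are below) =====
def Claim_equal_discard_nulls_py : Prop := ∀ (iterable : List Int), Dom_discard_nulls_py iterable → Spec_discard_nulls_py iterable (discard_nulls_py iterable)

-- ===== LEMMAS AND PROOFS =====

-- the common cut point: index just past the last nonzero element
def cut : List Int → Nat
  | [] => 0
  | x :: r => if cut r = 0 then (if x = 0 then 0 else 1) else cut r + 1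

theorem cut_le_length (l : List Int) : cut l ≤ l.length := by
  induction l with
  | nil => simp [cut]
  | cons x r ih => simp only [cut, List.length_cons]; split_ifs <;> omega

theorem aCount_append (a b : List Int) :
    aCount (a ++ b) = if aCount a = a.length then a.length + aCount b else aCount a := by
  induction a with
  | nil => simp [aCount]
  | cons x r ih =>
    by_cases hx : x = 0
    · simp only [List.cons_append, aCount, hx, ne_eq, not_true_eq_false,
        if_false, List.length_cons, ih]
      split_ifs <;> omega
    · simp only [List.cons_append, aCount, hx, ne_eq, not_false_eq_true, if_true,
        List.length_cons]
      split_ifs <;> simp_all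

theorem aCount_reverse (l : List Int) : aCount l.reverse = l.length - cut l := by
  induction l with
  | nil => simp [aCount, cut]
  | cons x r ih =>
    have hle := cut_le_length r
    have hx : aCount [x] = if x = 0 then 1 else 0 := by
      by_cases h : x = 0 <;> simp [aCount, h]
    rw [List.reverse_cons, aCount_append, ih, List.length_reverse, hx]
    simp only [cut, List.length_cons]
    split_ifs <;> omega

theorem aCount_reverse_zero_iff (l : List Int) : aCount l.reverse = 0 ↔ cut l = l.length := by
  have h := aCount_reverse l
  have hle := cut_le_length l
  omega

theorem bLoop_eq (l : List Int) (s : Int) (acc : Int) :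
    (PySem.List.enumerate l s).foldl (fun acc p => if p.2 ≠ 0 then p.1 + 1 else acc) acc
      = if cut l = 0 then acc else s + cut l := by
  induction l generalizing s acc with
  | nil => simp [PySem.List.enumerate_nil, cut]
  | cons x r ih =>
    simp only [PySem.List.enumerate_cons, List.foldl_cons, ih, cut]
    split_ifs with h1 h2 h3 h4 <;> simp_all; omega

theorem a_eq_take_cut (l : List Int) : discard_nulls_py l = l.take (cut l) := by
  unfold discard_nulls_py
  by_cases h : aCount l.reverse = 0
  · rw [(aCount_reverse_zero_iff l).mp h] at *
    simp [h, List.take_length]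
  · have hc : cut l < l.length := by
      have := aCount_reverse l; have := cut_le_length l; omega
    simp only [h, ne_eq, not_false_iff, if_true]
    have hk : 0 < aCount l.reverse := Nat.pos_of_ne_zero h
    rw [show PySem.List.slice l none (some (-(aCount l.reverse : Int)))
          = l.take (PySem.List.clampIdx l.length (-(aCount l.reverse : Int))) from rfl,
        PySem.List.clampIdx_neg_natCast _ _ hk, aCount_reverse]
    congr 1
    have := cut_le_length l
    omega

theorem b_eq_take_cut (l : List Int) : discard_nulls_py_alt l = l.take (cut l) := by
  unfold discard_nulls_py_alt
  have h := bLoop_eq l 0 0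
  rw [h]
  by_cases hc : cut l = 0
  · simp [hc, PySem.List.slice_to]
  · rw [if_neg hc]
    rw [PySem.List.slice_to _ (by positivity)]
    simp

-- ===== VERDICT (by name: the statement is the Claim_ definition above) =====
theorem discard_nulls_py_spec : Claim_equal_discard_nulls_py := by
  intro l _
  unfold Spec_discard_nulls_py
  rw [a_eq_take_cut, b_eq_take_cut]
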